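-- pv_equiv track=rewrite | github.com/R4Ajeti/counting-paths-coding-challenge | core/helpers.py | filterStringsByConsecutiveChars
-- ===== SOURCE A (Python) =====
-- def filterStringsByConsecutiveChars(inputList):
--     filteredList = []
--
--     for string in inputList:
--         for i in range(len(string) - 2):
--             if string[i] == string[i + 1] == string[i + 2]:
--                 filteredList.append(string)
--                 break
--
--     return filteredList
-- ===== SOURCE B (Python) =====
-- from itertools import groupby
--
--
-- def filterStringsByConsecutiveChars(inputList):
--     return [s for s in inputList
--             if any(sum(1 for _ in grp) >= 3 for _, grp in groupby(s))]
-- ===== Notes on version B (the rewrite author's own statement) =====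
-- stated objective: idiomatic
-- what changed: Replaces the index-based triple comparison with a break inside an explicit accumulator loop by a list comprehension that keeps a string iff itertools.groupby yields a maximal run of length >= 3.
import Mathlib
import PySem

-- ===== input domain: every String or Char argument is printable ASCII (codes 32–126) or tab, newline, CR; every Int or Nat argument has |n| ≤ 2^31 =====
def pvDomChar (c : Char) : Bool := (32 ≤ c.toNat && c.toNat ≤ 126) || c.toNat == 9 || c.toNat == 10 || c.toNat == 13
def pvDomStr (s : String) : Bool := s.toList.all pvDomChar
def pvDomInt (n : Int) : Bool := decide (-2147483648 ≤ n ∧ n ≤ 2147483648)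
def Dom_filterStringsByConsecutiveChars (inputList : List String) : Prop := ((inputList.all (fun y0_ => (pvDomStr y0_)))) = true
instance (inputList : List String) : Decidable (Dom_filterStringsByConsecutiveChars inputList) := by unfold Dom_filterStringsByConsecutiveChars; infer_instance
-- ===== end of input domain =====

-- B replaces A's index-tripled comparison with an inner break by a list comprehension
-- over maximal equal-character runs (itertools.groupby): idiomatic, same cost.

-- ===== PORT A =====
-- inner loop 'for i in range(len(string) - 2): if string[i]==string[i+1]==string[i+2]: … break'
def pvLoopA (s : List Char) (i : Nat) : Bool :=
  if h : i + 3 ≤ s.length then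
    if s[i]'(by omega) == s[i+1]'(by omega) && s[i+1]'(by omega) == s[i+2]'(by omega) then
      true
    else
      pvLoopA s (i+1)
  else false
termination_by s.length - i

def filterStringsByConsecutiveChars (inputList : List String) : List String :=
  inputList.foldl (fun acc s => if pvLoopA s.toList 0 then acc ++ [s] else acc) []

-- ===== PORT B =====
-- groupby: split off the maximal run of the leading character, keep its length
def pvTakeRun (c : Char) : List Char → Nat × List Char
  | [] => (0, [])
  | x :: xs => if x == c then ((pvTakeRun c xs).1 + 1, (pvTakeRun c xs).2) else (0, x :: xs)

theorem pvTakeRun_len (c : Char) (xs : List Char) : (pvTakeRun c xs).2.length ≤ xs.length := by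
  induction xs with
  | nil => simp [pvTakeRun]
  | cons x xs ih =>
    simp only [pvTakeRun]
    split
    · exact Nat.le_succ_of_le ih
    · simp

-- 'any(sum(1 for _ in grp) >= 3 for _, grp in groupby(s))'
def pvHasRun3 : List Char → Bool
  | [] => false
  | c :: rest =>
    if (pvTakeRun c rest).1 + 1 ≥ 3 then true else pvHasRun3 (pvTakeRun c rest).2
termination_by l => l.length
decreasing_by
  have := pvTakeRun_len c rest
  simp only [List.length_cons]
  omega

def filterStringsByConsecutiveChars_alt (inputList : List String) : List String :=
  inputList.filter (fun s => pvHasRun3 s.toList)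

-- ===== PRECONDITION & SPEC =====
def Spec_filterStringsByConsecutiveChars (inputList : List String) (out : List String) : Prop := out = filterStringsByConsecutiveChars_alt inputList
instance (inputList : List String) (out : List String) : Decidable (Spec_filterStringsByConsecutiveChars inputList out) := by unfold Spec_filterStringsByConsecutiveChars; infer_instance

-- ===== CLAIM (what is proved, stated in full; the proofs are below) =====
def Claim_equal_filterStringsByConsecutiveChars : Prop := ∀ (inputList : List String), Dom_filterStringsByConsecutiveChars inputList → Spec_filterStringsByConsecutiveChars inputList (filterStringsByConsecutiveChars inputList)

-- ===== LEMMAS AND PROOFS =====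

-- common characterisation: some adjacent triple of equal characters
def pvHasTriple : List Char → Bool
  | a :: b :: c :: rest => (a == b && b == c) || pvHasTriple (b :: c :: rest)
  | _ => false

theorem pvHasTriple_short (l : List Char) (h : l.length < 3) : pvHasTriple l = false := by
  match l with
  | [] => rfl
  | [_] => rfl
  | [_, _] => rfl
  | _ :: _ :: _ :: t =>
    simp only [List.length_cons] at h
    exact absurd h (by omega)

theorem pvHasTriple_cons_ne (x y : Char) (zs : List Char) (h : (x == y) = false) :
    pvHasTriple (x :: y :: zs) = pvHasTriple (y :: zs) := by
  cases zs with
  | nil => simp [pvHasTriple]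
  | cons z zs => simp [pvHasTriple, h]

theorem pvLoopA_eq_drop (s : List Char) (i : Nat) :
    pvLoopA s i = pvHasTriple (s.drop i) := by
  rw [pvLoopA]
  by_cases h : i + 3 ≤ s.length
  · rw [dif_pos h]
    have ih := pvLoopA_eq_drop s (i+1)
    have h1 : s.drop (i+1) = s[i+1]'(by omega) :: s[i+2]'(by omega) :: s.drop (i+3) := by
      rw [List.drop_eq_getElem_cons (l := s) (i := i+1) (by omega),
          List.drop_eq_getElem_cons (l := s) (i := i+2) (by omega)]
    have h0 : s.drop i = s[i]'(by omega) :: s[i+1]'(by omega) :: s[i+2]'(by omega) :: s.drop (i+3) := by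
      rw [List.drop_eq_getElem_cons (l := s) (i := i) (by omega), h1]
    rw [h0, ih, h1]
    cases htrip : (s[i]'(by omega) == s[i+1]'(by omega) && s[i+1]'(by omega) == s[i+2]'(by omega)) with
    | true => simp [pvHasTriple, htrip]
    | false => simp [pvHasTriple, htrip]
  · rw [dif_neg h, pvHasTriple_short (s.drop i) (by simp only [List.length_drop]; omega)]
termination_by s.length - i

theorem pvHasRun3_eq : ∀ l : List Char, pvHasRun3 l = pvHasTriple l
  | [] => by simp [pvHasRun3, pvHasTriple]
  | [a] => by simp [pvHasRun3, pvTakeRun, pvHasTriple]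
  | a :: b :: rest => by
    by_cases hab : a = b
    · subst hab
      match rest with
      | [] => simp [pvHasRun3, pvTakeRun, pvHasTriple]
      | c :: rest2 =>
        by_cases hc : c = a
        · subst hc
          rw [pvHasRun3, if_pos (by simp [pvTakeRun])]
          simp [pvHasTriple]
        · have hac : a ≠ c := fun hh => hc hh.symm
          have ih := pvHasRun3_eq (c :: rest2)
          have h2 : pvHasTriple (a :: c :: rest2) = pvHasTriple (c :: rest2) :=
            pvHasTriple_cons_ne a c rest2 (by simp [hac])
          simp only [pvHasRun3, pvTakeRun, beq_self_eq_true, if_true]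
          simp [pvHasTriple, hc, hac, ih, h2]
    · have hba : b ≠ a := fun hh => hab hh.symm
      have ih := pvHasRun3_eq (b :: rest)
      have h2 : pvHasTriple (a :: b :: rest) = pvHasTriple (b :: rest) :=
        pvHasTriple_cons_ne a b rest (by simp [hab])
      simp only [pvHasRun3, pvTakeRun]
      simp [hba, ih, h2]

-- ===== VERDICT (by name: the statement is the Claim_ definition above) =====
theorem filterStringsByConsecutiveChars_spec : Claim_equal_filterStringsByConsecutiveChars := by
  intro inputList _
  unfold Spec_filterStringsByConsecutiveChars filterStringsByConsecutiveChars filterStringsByConsecutiveChars_alt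
  rw [PySem.List.foldl_append_if_eq_filter]
  rw [List.nil_append]
  apply List.filter_congr
  intro s _
  rw [pvLoopA_eq_drop, List.drop_zero, pvHasRun3_eq]
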